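-- pv_equiv track=rewrite | github.com/SagnikMukherjee/PARC | src/baseline/step_error_eval.py | process_model_output
-- ===== SOURCE A (Python) =====
-- from typing import List, Dict, Any
--
-- def process_model_output(output: str) -> Dict[str, str]:
--     """Process model output to extract error classification and explanation."""
--     # Convert to lowercase for field matching
--     output_lower = output.lower()
--     lines = output_lower.strip().split('\n')
--
--     result = {
--         'verdict': 'Unknown',
--         'reasoning': '',
--         'explanation': output  # Keep the entire original output
--     }
--
--     # Find reasoning and verdict
--     for i, line in enumerate(lines):
--         if line.startswith('reasoning:'):
--             # Collect all lines until we hit 'verdict:'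
--             reasoning_lines = []
--             j = i + 1
--             while j < len(lines) and not lines[j].startswith('verdict:'):
--                 if lines[j].strip():  # Skip empty lines
--                     reasoning_lines.append(lines[j].strip())
--                 j += 1
--             result['reasoning'] = ' '.join(reasoning_lines)
--         elif line.startswith('verdict:'):
--             result['verdict'] = line.replace('verdict:', '').strip().upper()
--
--     return result
-- ===== SOURCE B (Python) =====
-- def process_model_output(output: str):
--     """Process model output to extract error classification and explanation.
--
--     Single linear pass with a collecting flag instead of the nested outer-for /
--     inner-while scan of the original.
--     """
--     verdict = 'Unknown'
--     collecting = False
--     reasoning_lines = []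
--     for line in output.lower().strip().split('\n'):
--         if line.startswith('reasoning:'):
--             reasoning_lines = []
--             collecting = True
--         elif line.startswith('verdict:'):
--             collecting = False
--             verdict = line.replace('verdict:', '').strip().upper()
--         elif collecting and line.strip():
--             reasoning_lines.append(line.strip())
--     return {
--         'verdict': verdict,
--         'reasoning': ' '.join(reasoning_lines),
--         'explanation': output,
--     }
-- ===== Notes on version B (the rewrite author's own statement) =====
-- stated objective: simpler
-- what changed: Replaced the nested outer-for/inner-while lookahead scan (which re-collects each reasoning block by indexing ahead from the header line) with a single linear pass keeping a collecting flag and a buffer that is reset at each reasoning header; the result dict is built once at the end instead of mutated.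
import Mathlib
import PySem

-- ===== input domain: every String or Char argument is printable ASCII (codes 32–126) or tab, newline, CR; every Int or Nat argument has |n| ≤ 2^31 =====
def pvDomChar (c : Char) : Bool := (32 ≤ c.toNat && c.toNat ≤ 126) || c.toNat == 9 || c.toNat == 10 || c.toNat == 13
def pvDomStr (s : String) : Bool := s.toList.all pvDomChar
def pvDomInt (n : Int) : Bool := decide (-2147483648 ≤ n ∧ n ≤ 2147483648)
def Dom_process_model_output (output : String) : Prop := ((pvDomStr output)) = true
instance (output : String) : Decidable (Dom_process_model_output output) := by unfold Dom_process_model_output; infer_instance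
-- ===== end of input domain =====

-- B replaces A's nested outer-for/inner-lookahead-while scan by a single linear pass
-- with a collecting flag and a buffer (simpler, one pass). Return-value equivalence only.

-- ===== PORT A =====

-- inner `while j < len(lines) and not lines[j].startswith('verdict:')` collection loop
def pvCollectA (lines : List String) (j : Nat) (acc : List String) : List String :=
  if h : j < lines.length then
    if PySem.Str.startswith lines[j] "verdict:" then acc
    else pvCollectA lines (j + 1)
      (if PySem.Str.strip lines[j] ≠ "" then acc ++ [PySem.Str.strip lines[j]] else acc)
  else acc
termination_by lines.length - j

-- outer `for i, line in enumerate(lines)` loop, mutating the result dict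
def pvOuterA (lines : List String) (i : Nat) (rem : List String)
    (result : PySem.Dict String String) : PySem.Dict String String :=
  match rem with
  | [] => result
  | line :: rest =>
    if PySem.Str.startswith line "reasoning:" then
      pvOuterA lines (i + 1) rest
        (result.insert "reasoning" (PySem.Str.join " " (pvCollectA lines (i + 1) [])))
    else if PySem.Str.startswith line "verdict:" then
      pvOuterA lines (i + 1) rest
        (result.insert "verdict"
          (PySem.Str.upper (PySem.Str.strip (PySem.Str.replace line "verdict:" ""))))
    else pvOuterA lines (i + 1) rest result

def process_model_output (output : String) : List (String × String) :=
  let output_lower := PySem.Str.lower output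
  let lines := (PySem.Str.split? (PySem.Str.strip output_lower) "\n").getD []
  let result : PySem.Dict String String :=
    PySem.Dict.mk [("verdict", "Unknown"), ("reasoning", ""), ("explanation", output)]
  (pvOuterA lines 0 lines result).items

-- ===== PORT B =====

-- state: (verdict, collecting, reasoning_lines)
def pvStepB (st : String × Bool × List String) (line : String) : String × Bool × List String :=
  if PySem.Str.startswith line "reasoning:" then (st.1, true, [])
  else if PySem.Str.startswith line "verdict:" then
    (PySem.Str.upper (PySem.Str.strip (PySem.Str.replace line "verdict:" "")), false, st.2.2)
  else if st.2.1 && PySem.Str.strip line != "" then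
    (st.1, st.2.1, st.2.2 ++ [PySem.Str.strip line])
  else st

def process_model_output_alt (output : String) : List (String × String) :=
  let lines := (PySem.Str.split? (PySem.Str.strip (PySem.Str.lower output)) "\n").getD []
  let st := lines.foldl pvStepB ("Unknown", false, [])
  [("verdict", st.1), ("reasoning", PySem.Str.join " " st.2.2), ("explanation", output)]

-- ===== PRECONDITION & SPEC =====
def Spec_process_model_output (output : String) (out : List (String × String)) : Prop := out = process_model_output_alt output
instance (output : String) (out : List (String × String)) : Decidable (Spec_process_model_output output out) := by unfold Spec_process_model_output; infer_instance

-- ===== CLAIM (what is proved, stated in full; the proofs are below) =====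
def Claim_equal_process_model_output : Prop := ∀ (output : String), Dom_process_model_output output → Spec_process_model_output output (process_model_output output)

-- ===== LEMMAS AND PROOFS =====

-- accumulator-free form of the inner collection loop
def pvCollectL : List String → List String
  | [] => []
  | l :: r =>
    if PySem.Str.startswith l "verdict:" then []
    else if PySem.Str.strip l ≠ "" then PySem.Str.strip l :: pvCollectL r
    else pvCollectL r

-- A's outer loop as structural recursion on the remaining lines, with lookahead into them
def pvAF : List String → String → String → String × String
  | [], v, r => (v, r)
  | l :: rest, v, r =>
    if PySem.Str.startswith l "reasoning:" then
      pvAF rest v (PySem.Str.join " " (pvCollectL rest))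
    else if PySem.Str.startswith l "verdict:" then
      pvAF rest (PySem.Str.upper (PySem.Str.strip (PySem.Str.replace l "verdict:" ""))) r
    else pvAF rest v r

theorem pvCollectL_verdict (l : String) (r : List String)
    (h2 : PySem.Str.startswith l "verdict:" = true) : pvCollectL (l :: r) = [] := by
  simp only [pvCollectL, h2, if_true]

theorem pvCollectL_keep (l : String) (r : List String)
    (h2 : ¬ PySem.Str.startswith l "verdict:" = true) (h3 : PySem.Str.strip l ≠ "") :
    pvCollectL (l :: r) = PySem.Str.strip l :: pvCollectL r := by
  simp only [pvCollectL, h2, h3, if_false, if_true, ne_eq, not_false_iff, Bool.false_eq_true]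

theorem pvCollectL_skip (l : String) (r : List String)
    (h2 : ¬ PySem.Str.startswith l "verdict:" = true) (h3 : PySem.Str.strip l = "") :
    pvCollectL (l :: r) = pvCollectL r := by
  simp only [pvCollectL, h2, h3, if_false, ne_eq, not_true, Bool.false_eq_true]

theorem pvAF_reasoning (l : String) (rest : List String) (v r : String)
    (h1 : PySem.Str.startswith l "reasoning:" = true) :
    pvAF (l :: rest) v r = pvAF rest v (PySem.Str.join " " (pvCollectL rest)) := by
  simp only [pvAF, h1, if_true]

theorem pvAF_verdict (l : String) (rest : List String) (v r : String)
    (h1 : ¬ PySem.Str.startswith l "reasoning:" = true)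
    (h2 : PySem.Str.startswith l "verdict:" = true) :
    pvAF (l :: rest) v r
      = pvAF rest (PySem.Str.upper (PySem.Str.strip (PySem.Str.replace l "verdict:" ""))) r := by
  simp only [pvAF, h1, h2, if_true, if_false, Bool.false_eq_true]

theorem pvAF_other (l : String) (rest : List String) (v r : String)
    (h1 : ¬ PySem.Str.startswith l "reasoning:" = true)
    (h2 : ¬ PySem.Str.startswith l "verdict:" = true) :
    pvAF (l :: rest) v r = pvAF rest v r := by
  simp only [pvAF, h1, h2, if_false, Bool.false_eq_true]

theorem pvStepB_reasoning (st : String × Bool × List String) (l : String)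
    (h1 : PySem.Str.startswith l "reasoning:" = true) :
    pvStepB st l = (st.1, true, []) := by
  simp only [pvStepB, h1, if_true]

theorem pvStepB_verdict (st : String × Bool × List String) (l : String)
    (h1 : ¬ PySem.Str.startswith l "reasoning:" = true)
    (h2 : PySem.Str.startswith l "verdict:" = true) :
    pvStepB st l
      = (PySem.Str.upper (PySem.Str.strip (PySem.Str.replace l "verdict:" "")), false, st.2.2) := by
  simp only [pvStepB, h1, h2, if_true, if_false, Bool.false_eq_true]

theorem pvStepB_keep (st : String × Bool × List String) (l : String)
    (h1 : ¬ PySem.Str.startswith l "reasoning:" = true)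
    (h2 : ¬ PySem.Str.startswith l "verdict:" = true)
    (hc : st.2.1 = true) (h3 : PySem.Str.strip l ≠ "") :
    pvStepB st l = (st.1, st.2.1, st.2.2 ++ [PySem.Str.strip l]) := by
  have hb : (st.2.1 && PySem.Str.strip l != "") = true := by
    simp [hc, h3]
  simp only [pvStepB, h1, h2, hb, if_true, if_false, Bool.false_eq_true]

theorem pvStepB_still (st : String × Bool × List String) (l : String)
    (h1 : ¬ PySem.Str.startswith l "reasoning:" = true)
    (h2 : ¬ PySem.Str.startswith l "verdict:" = true)
    (hb : (st.2.1 && PySem.Str.strip l != "") = false) :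
    pvStepB st l = st := by
  simp only [pvStepB, h1, h2, hb, if_false, Bool.false_eq_true]

theorem pvCollectA_eq (lines : List String) (j : Nat) (acc : List String) :
    pvCollectA lines j acc = acc ++ pvCollectL (lines.drop j) := by
  induction j, acc using pvCollectA.induct lines with
  | case1 j acc h hv =>
      rw [pvCollectA, dif_pos h, if_pos hv, List.drop_eq_getElem_cons h,
        pvCollectL_verdict _ _ hv, List.append_nil]
  | case2 j acc h hv ih =>
      simp only [dite_eq_ite] at ih
      rw [pvCollectA, dif_pos h, if_neg hv, ih, List.drop_eq_getElem_cons h]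
      by_cases h3 : PySem.Str.strip lines[j] ≠ ""
      · rw [if_pos h3, pvCollectL_keep _ _ hv h3]
        simp
      · rw [if_neg h3]
        rw [not_ne_iff] at h3
        rw [pvCollectL_skip _ _ hv h3]
  | case3 j acc h =>
      rw [pvCollectA, dif_neg h, List.drop_eq_nil_of_le (Nat.le_of_not_lt h)]
      simp [pvCollectL]

theorem pvOuterA_eq (lines : List String) (rem : List String) (i : Nat)
    (hrem : lines.drop i = rem) (v r e : String) :
    pvOuterA lines i rem (PySem.Dict.mk [("verdict", v), ("reasoning", r), ("explanation", e)])
      = PySem.Dict.mk [("verdict", (pvAF rem v r).1), ("reasoning", (pvAF rem v r).2),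
          ("explanation", e)] := by
  induction rem generalizing i v r with
  | nil => simp [pvOuterA, pvAF]
  | cons l rest ih =>
      have htail : lines.drop (i + 1) = rest := by
        rw [← List.tail_drop, hrem]; rfl
      rw [pvOuterA]
      by_cases h1 : PySem.Str.startswith l "reasoning:"
      · rw [if_pos h1]
        have hins : (PySem.Dict.mk [("verdict", v), ("reasoning", r), ("explanation", e)]).insert
            "reasoning" (PySem.Str.join " " (pvCollectA lines (i + 1) []))
            = PySem.Dict.mk [("verdict", v),
                ("reasoning", PySem.Str.join " " (pvCollectA lines (i + 1) [])),
                ("explanation", e)] := by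
          simp [PySem.Dict.insert]
        rw [hins, ih (i + 1) htail, pvCollectA_eq, htail, pvAF_reasoning _ _ _ _ h1,
          List.nil_append]
      · rw [if_neg h1]
        by_cases h2 : PySem.Str.startswith l "verdict:"
        · rw [if_pos h2]
          have hins : (PySem.Dict.mk [("verdict", v), ("reasoning", r), ("explanation", e)]).insert
              "verdict" (PySem.Str.upper (PySem.Str.strip (PySem.Str.replace l "verdict:" "")))
              = PySem.Dict.mk [("verdict",
                  PySem.Str.upper (PySem.Str.strip (PySem.Str.replace l "verdict:" ""))),
                  ("reasoning", r), ("explanation", e)] := by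
            simp [PySem.Dict.insert]
          rw [hins, ih (i + 1) htail, pvAF_verdict _ _ _ _ h1 h2]
        · rw [if_neg h2, ih (i + 1) htail, pvAF_other _ _ _ _ h1 h2]

theorem pvAF_eq_foldB (ls : List String) (v r : String) (c : Bool) (buf : List String)
    (hc : c = true → r = PySem.Str.join " " (buf ++ pvCollectL ls))
    (hnc : c = false → r = PySem.Str.join " " buf) :
    pvAF ls v r = ((ls.foldl pvStepB (v, c, buf)).1,
      PySem.Str.join " " (ls.foldl pvStepB (v, c, buf)).2.2) := by
  induction ls generalizing v r c buf with
  | nil =>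
      cases c with
      | false => simpa [pvAF] using hnc rfl
      | true => simpa [pvAF, pvCollectL] using hc rfl
  | cons l rest ih =>
      rw [List.foldl_cons]
      by_cases h1 : PySem.Str.startswith l "reasoning:"
      · rw [pvAF_reasoning _ _ _ _ h1, pvStepB_reasoning _ _ h1]
        exact ih _ _ true [] (fun _ => by simp) (by simp)
      · by_cases h2 : PySem.Str.startswith l "verdict:"
        · rw [pvAF_verdict _ _ _ _ h1 h2, pvStepB_verdict _ _ h1 h2]
          have hr : r = PySem.Str.join " " buf := by
            cases c with
            | false => exact hnc rfl
            | true =>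
                rw [hc rfl, pvCollectL_verdict _ _ h2, List.append_nil]
          exact ih _ _ false buf (by simp) (fun _ => hr)
        · rw [pvAF_other _ _ _ _ h1 h2]
          by_cases h3 : PySem.Str.strip l ≠ ""
          · cases c with
            | false =>
                rw [pvStepB_still _ _ h1 h2 (by simp)]
                exact ih _ _ false buf (by simp) hnc
            | true =>
                rw [pvStepB_keep _ _ h1 h2 rfl h3]
                refine ih _ _ true (buf ++ [PySem.Str.strip l]) (fun _ => ?_) (by simp)
                rw [hc rfl, pvCollectL_keep _ _ h2 h3, List.append_assoc]
                rfl
          · rw [not_ne_iff] at h3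
            rw [pvStepB_still _ _ h1 h2 (by simp [h3])]
            cases c with
            | false => exact ih _ _ false buf (by simp) hnc
            | true =>
                refine ih _ _ true buf (fun _ => ?_) (by simp)
                rw [hc rfl, pvCollectL_skip _ _ h2 h3]

-- ===== VERDICT (by name: the statement is the Claim_ definition above) =====
theorem process_model_output_spec : Claim_equal_process_model_output := by
  intro output _
  unfold Spec_process_model_output
  simp only [process_model_output, process_model_output_alt]
  rw [pvOuterA_eq _ _ 0 List.drop_zero "Unknown" "" output,
    pvAF_eq_foldB _ "Unknown" "" false [] (by simp) (fun _ => by decide)]
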